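-- pv_equiv track=rewrite | github.com/rubinda/lang-tech | WhoLang/who_lang.py | out_of_place_linkage
-- ===== SOURCE A (Python) =====
-- def out_of_place_linkage(cat_profile, doc_profile, max_oop=301):
--     """
--     Poracuna out of place razdaljo med dvema seznamoma n gramov
--     (Manjsa razdalja pomeni, da sta si dokumenta bolj podobna)
--
--     :param cat_profile: seznam n gramov kategorije
--     :param doc_profile: seznam n gramov dokumenta
--     :param max_oop: vrednost out of place za n grame, ki niso bili najdeni
--     :return (int): skalar razdalje
--     """
--     oop_sum = 0
--     for position, ngram in enumerate(doc_profile.keys()):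
--         try:
--             oop = list(cat_profile.keys()).index(ngram)
--             oop_sum += oop
--         except ValueError:
--             # N-gram ni najden v mnozici
--             oop_sum += max_oop
--     return oop_sum
-- ===== SOURCE B (Python) =====
-- def out_of_place_linkage(cat_profile, doc_profile, max_oop=301):
--     """Single pass over cat_profile with a match counter; unmatched doc
--     ngrams are accounted for by one closed-form term at the end."""
--     oop_sum = 0
--     matched = 0
--     for pos, ngram in enumerate(cat_profile.keys()):
--         if ngram in doc_profile:
--             oop_sum += pos
--             matched += 1
--     return oop_sum + (len(doc_profile) - matched) * max_oop
-- ===== Notes on version B (the rewrite author's own statement) =====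
-- stated objective: faster
-- what changed: Instead of looking up each doc ngram's index in a freshly materialised list of cat keys (with try/except for misses), B makes one enumerate pass over cat keys, summing positions of ngrams present in doc and counting matches, then adds (len(doc)-matched)*max_oop for all misses at once.
import Mathlib
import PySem

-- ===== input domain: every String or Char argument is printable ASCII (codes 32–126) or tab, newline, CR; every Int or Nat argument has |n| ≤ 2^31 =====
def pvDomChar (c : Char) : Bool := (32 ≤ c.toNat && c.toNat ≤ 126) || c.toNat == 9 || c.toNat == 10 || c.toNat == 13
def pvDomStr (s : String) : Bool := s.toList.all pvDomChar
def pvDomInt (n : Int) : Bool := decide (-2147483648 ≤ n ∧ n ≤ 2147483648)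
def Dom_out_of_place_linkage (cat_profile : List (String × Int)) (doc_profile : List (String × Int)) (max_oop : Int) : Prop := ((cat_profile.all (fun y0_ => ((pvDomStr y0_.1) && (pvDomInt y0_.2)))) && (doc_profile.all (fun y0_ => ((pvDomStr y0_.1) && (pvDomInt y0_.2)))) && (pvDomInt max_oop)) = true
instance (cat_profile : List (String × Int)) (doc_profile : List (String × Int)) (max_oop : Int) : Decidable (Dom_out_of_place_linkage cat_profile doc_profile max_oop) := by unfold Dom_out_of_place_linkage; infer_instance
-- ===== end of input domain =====

-- B replaces A's per-doc-ngram index scan of the cat key list (O(|doc|*|cat|)) by a single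
-- enumerate pass over the cat keys with a match counter and one closed-form miss term.


-- ===== PORT A =====
def out_of_place_linkage (cat_profile : List (String × Int)) (doc_profile : List (String × Int)) (max_oop : Int) : Int :=
  let catD := PySem.Dict.ofList cat_profile
  let docD := PySem.Dict.ofList doc_profile
  -- for position, ngram in enumerate(doc_profile.keys()): try index / except add max_oop
  -- (the loop variable `position` is never used, so the fold carries only oop_sum)
  docD.keys.foldl (fun oop_sum ngram =>
    match PySem.List.index? catD.keys ngram with
    | some oop => oop_sum + (oop : Int)
    | none     => oop_sum + max_oop) 0

-- ===== PORT B =====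
def out_of_place_linkage_alt (cat_profile : List (String × Int)) (doc_profile : List (String × Int)) (max_oop : Int) : Int :=
  let catD := PySem.Dict.ofList cat_profile
  let docD := PySem.Dict.ofList doc_profile
  let st := (PySem.List.enumerate catD.keys).foldl
    (fun (st : Int × Int) p => if docD.contains p.2 then (st.1 + p.1, st.2 + 1) else st)
    (0, 0)
  st.1 + ((docD.size : Int) - st.2) * max_oop

-- ===== PRECONDITION & SPEC =====
def Spec_out_of_place_linkage (cat_profile : List (String × Int)) (doc_profile : List (String × Int)) (max_oop : Int) (out : Int) : Prop := out = out_of_place_linkage_alt cat_profile doc_profile max_oop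
instance (cat_profile : List (String × Int)) (doc_profile : List (String × Int)) (max_oop : Int) (out : Int) : Decidable (Spec_out_of_place_linkage cat_profile doc_profile max_oop out) := by unfold Spec_out_of_place_linkage; infer_instance

-- ===== CLAIM (what is proved, stated in full; the proofs are below) =====
def Claim_equal_out_of_place_linkage : Prop := ∀ (cat_profile : List (String × Int)) (doc_profile : List (String × Int)) (max_oop : Int), Dom_out_of_place_linkage cat_profile doc_profile max_oop → Spec_out_of_place_linkage cat_profile doc_profile max_oop (out_of_place_linkage cat_profile doc_profile max_oop)

-- ===== LEMMAS AND PROOFS =====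

-- the addend A's loop adds for one doc ngram
def pvW (K : List String) (mx : Int) (d : String) : Int :=
  match PySem.List.index? K d with
  | some i => (i : Int)
  | none   => mx

-- position sum of the pairs of E whose key lies in D
def pvS (E : List (Int × String)) (D : List String) : Int :=
  ((E.filter (fun p => decide (p.2 ∈ D))).map (·.1)).sum

-- number of pairs of E whose key lies in D
def pvC (E : List (Int × String)) (D : List String) : Int :=
  ((E.filter (fun p => decide (p.2 ∈ D))).length : Int)

theorem pvA_foldl (D : List String) (K : List String) (mx : Int) :
    ∀ a : Int,
      D.foldl (fun oop_sum ngram =>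
        match PySem.List.index? K ngram with
        | some oop => oop_sum + (oop : Int)
        | none     => oop_sum + mx) a = a + (D.map (pvW K mx)).sum := by
  induction D with
  | nil => simp
  | cons d D ih =>
    intro a
    simp only [List.foldl_cons, List.map_cons, List.sum_cons, ih]
    unfold pvW
    cases PySem.List.index? K d <;> simp <;> ring

theorem pvB_foldl (D : List String) (E : List (Int × String)) :
    ∀ a m : Int,
      E.foldl (fun (st : Int × Int) p =>
        if decide (p.2 ∈ D) = true then (st.1 + p.1, st.2 + 1) else st) (a, m)
      = (a + pvS E D, m + pvC E D) := by
  induction E with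
  | nil => intro a m; simp [pvS, pvC]
  | cons p E ih =>
    intro a m
    simp only [List.foldl_cons]
    by_cases h : p.2 ∈ D
    · rw [if_pos (by simpa using h), ih]
      simp only [pvS, pvC, List.filter_cons, decide_eq_true_eq, if_pos h]
      simp only [List.map_cons, List.sum_cons, List.length_cons, Prod.mk.injEq]
      constructor <;> push_cast <;> ring
    · rw [if_neg (by simpa using h), ih]
      simp only [pvS, pvC, List.filter_cons, decide_eq_true_eq, if_neg h]

-- no pair of E carries key d when d is not among E's keys
theorem pvS_single_not_mem (E : List (Int × String)) (d : String)
    (h : d ∉ E.map (·.2)) : pvS E [d] = 0 ∧ pvC E [d] = 0 := by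
  have hnil : E.filter (fun p => decide (p.2 ∈ [d])) = [] := by
    refine List.filter_eq_nil_iff.mpr ?_
    intro p hp
    simp only [List.mem_singleton, decide_eq_true_eq]
    intro hpd
    exact h (List.mem_map.mpr ⟨p, hp, hpd⟩)
  simp only [pvS, pvC]
  rw [hnil]
  simp

-- over enumerate of a nodup key list, the unique pair with key d carries position index?
theorem pvS_single_mem (K : List String) (d : String) :
    ∀ (i : Nat) (s : Int), K.Nodup → PySem.List.index? K d = some i →
      pvS (PySem.List.enumerate K s) [d] = s + (i : Int) ∧
      pvC (PySem.List.enumerate K s) [d] = 1 := by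
  induction K with
  | nil => intro i s _ h; simp [PySem.List.index?] at h
  | cons k K ih =>
    intro i s hnd hidx
    rw [PySem.List.enumerate_cons]
    by_cases hkd : k = d
    · subst hkd
      rw [PySem.List.index?_cons_self] at hidx
      obtain rfl : (0 : Nat) = i := Option.some_inj.mp hidx
      have hkE : k ∉ (PySem.List.enumerate K (s + 1)).map (·.2) := by
        rw [PySem.List.map_snd_enumerate]; exact (List.nodup_cons.mp hnd).1
      obtain ⟨h1, h2⟩ := pvS_single_not_mem (PySem.List.enumerate K (s + 1)) k hkE
      simp only [pvS, pvC] at h1 h2 ⊢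
      rw [List.filter_cons_of_pos (by simp)]
      simp only [List.map_cons, List.sum_cons, List.length_cons]
      rw [h1]
      refine ⟨by push_cast; ring, ?_⟩
      push_cast at h2 ⊢
      omega
    · rw [PySem.List.index?_cons_of_ne K hkd] at hidx
      cases hj : PySem.List.index? K d with
      | none => rw [hj] at hidx; simp at hidx
      | some j =>
        rw [hj] at hidx
        simp only [Option.map_some, Option.some_inj] at hidx
        obtain ⟨h1, h2⟩ := ih j (s + 1) (List.nodup_cons.mp hnd).2 hj
        simp only [pvS, pvC] at h1 h2 ⊢
        rw [List.filter_cons_of_neg (by simp [hkd])]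
        refine ⟨?_, h2⟩
        rw [h1]
        subst hidx
        push_cast; ring

-- adding a fresh doc ngram splits the position sum and match count
theorem pv_cons_split (E : List (Int × String)) (d : String) (D : List String) (hd : d ∉ D) :
    pvS E (d :: D) = pvS E D + pvS E [d] ∧ pvC E (d :: D) = pvC E D + pvC E [d] := by
  induction E with
  | nil => simp [pvS, pvC]
  | cons p E ih =>
    obtain ⟨ih1, ih2⟩ := ih
    simp only [pvS, pvC] at ih1 ih2 ⊢
    by_cases hpd : p.2 = d
    · have hpD : p.2 ∉ D := hpd ▸ hd
      rw [List.filter_cons_of_pos (by simp [hpd]),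
          List.filter_cons_of_neg (by simp [hpD]),
          List.filter_cons_of_pos (by simp [hpd])]
      simp only [List.map_cons, List.sum_cons, List.length_cons]
      rw [ih1]
      refine ⟨by ring, ?_⟩
      push_cast at ih2 ⊢; omega
    · by_cases hpD : p.2 ∈ D
      · rw [List.filter_cons_of_pos (by simp [hpD]),
            List.filter_cons_of_pos (by simp [hpD]),
            List.filter_cons_of_neg (by simp [hpd])]
        simp only [List.map_cons, List.sum_cons, List.length_cons]
        rw [ih1]
        refine ⟨by ring, ?_⟩
        push_cast at ih2 ⊢; omega
      · rw [List.filter_cons_of_neg (by simp [hpd, hpD]),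
            List.filter_cons_of_neg (by simp [hpD]),
            List.filter_cons_of_neg (by simp [hpd])]
        exact ⟨ih1, ih2⟩

-- the central identity: A's per-doc sum equals B's matched-position sum plus the miss term
theorem pv_main (K : List String) (mx : Int) :
    ∀ D : List String, K.Nodup → D.Nodup →
      (D.map (pvW K mx)).sum =
        pvS (PySem.List.enumerate K 0) D
          + ((D.length : Int) - pvC (PySem.List.enumerate K 0) D) * mx := by
  intro D
  induction D with
  | nil => intro _ _; simp [pvS, pvC]
  | cons d D ih =>
    intro hK hD
    obtain ⟨hdD, hD'⟩ := List.nodup_cons.mp hD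
    obtain ⟨hs, hc⟩ := pv_cons_split (PySem.List.enumerate K 0) d D hdD
    rw [List.map_cons, List.sum_cons, ih hK hD', hs, hc]
    by_cases hdK : d ∈ K
    · obtain ⟨i, hi⟩ := Option.isSome_iff_exists.mp
        ((PySem.List.index?_isSome_iff K d).mpr hdK)
      obtain ⟨h1, h2⟩ := pvS_single_mem K d i 0 hK hi
      rw [show pvW K mx d = (i : Int) by unfold pvW; rw [hi]]
      rw [h1, h2]
      simp only [List.length_cons]; push_cast; ring
    · have hi : PySem.List.index? K d = none :=
        (PySem.List.index?_eq_none_iff K d).mpr hdK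
      have hz : pvS (PySem.List.enumerate K 0) [d] = 0 ∧
          pvC (PySem.List.enumerate K 0) [d] = 0 := by
        apply pvS_single_not_mem
        rw [PySem.List.map_snd_enumerate]; exact hdK
      rw [show pvW K mx d = mx by unfold pvW; rw [hi]]
      rw [hz.1, hz.2]
      simp only [List.length_cons]; push_cast; ring

-- ===== VERDICT (by name: the statement is the Claim_ definition above) =====
theorem out_of_place_linkage_spec : Claim_equal_out_of_place_linkage := by
  intro cat_profile doc_profile max_oop _
  unfold Spec_out_of_place_linkage out_of_place_linkage out_of_place_linkage_alt
  set catD := PySem.Dict.ofList cat_profile with hcat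
  set docD := PySem.Dict.ofList doc_profile with hdoc
  have hK : catD.keys.Nodup := PySem.Dict.nodup_keys_ofList cat_profile
  have hD : docD.keys.Nodup := PySem.Dict.nodup_keys_ofList doc_profile
  have hA : docD.keys.foldl (fun oop_sum ngram =>
      match PySem.List.index? catD.keys ngram with
      | some oop => oop_sum + (oop : Int)
      | none     => oop_sum + max_oop) 0
      = (docD.keys.map (pvW catD.keys max_oop)).sum := by
    rw [pvA_foldl]; ring
  have hcont : ∀ (st : Int × Int) (p : Int × String),
      (if docD.contains p.2 then (st.1 + p.1, st.2 + 1) else st)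
      = (if decide (p.2 ∈ docD.keys) = true then (st.1 + p.1, st.2 + 1) else st) := by
    intro st p
    rw [PySem.Dict.contains_eq_decide_mem_keys]
  have hB : (PySem.List.enumerate catD.keys).foldl
      (fun (st : Int × Int) p => if docD.contains p.2 then (st.1 + p.1, st.2 + 1) else st)
      (0, 0)
      = (pvS (PySem.List.enumerate catD.keys) docD.keys,
         pvC (PySem.List.enumerate catD.keys) docD.keys) := by
    have hfun : (fun (st : Int × Int) p => if docD.contains p.2 then (st.1 + p.1, st.2 + 1) else st)
        = (fun (st : Int × Int) (p : Int × String) =>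
            if decide (p.2 ∈ docD.keys) = true then (st.1 + p.1, st.2 + 1) else st) := by
      funext st p; exact hcont st p
    rw [hfun, pvB_foldl]
    simp
  have hsize : (docD.size : Int) = (docD.keys.length : Int) := by
    simp [PySem.Dict.size, PySem.Dict.keys]
  simp only [hA, hB, hsize]
  rw [pv_main catD.keys max_oop docD.keys hK hD]
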